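-- pv_equiv track=rewrite | github.com/JMCinJiangSu/PharmReport | customize_filters.py | ad4701_tbrca_sum
-- ===== SOURCE A (Python) =====
-- def ad4701_tbrca_sum(var_list):
-- 	clinic_5_count = len([var for var in var_list if var["clinic_num_g"] == 5])
-- 	clinic_4_count = len([var for var in var_list if var["clinic_num_g"] == 4])
-- 	if clinic_5_count and clinic_4_count:
-- 		return "本次实验检出{0}个致病性变异和{1}个疑似致病性变异。".format(str(clinic_5_count), str(clinic_4_count))
-- 	elif clinic_5_count and not clinic_4_count:
-- 		return "本次实验检出{0}个致病性变异。".format(str(clinic_5_count))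
-- 	elif not clinic_5_count and clinic_4_count:
-- 		return "本次实验检出{0}个疑似致病性变异。".format(str(clinic_4_count))
-- 	else:
-- 		return "本次实验未检出致病性或疑似致病性变异。"
-- ===== SOURCE B (Python) =====
-- def ad4701_tbrca_sum(var_list):
--     c5 = 0
--     c4 = 0
--     for var in var_list:
--         v = var["clinic_num_g"]
--         if v == 5:
--             c5 += 1
--         elif v == 4:
--             c4 += 1
--     frags = []
--     if c5:
--         frags.append(str(c5) + "个致病性变异")
--     if c4:
--         frags.append(str(c4) + "个疑似致病性变异")
--     if not frags:
--         return "本次实验未检出致病性或疑似致病性变异。"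
--     return "本次实验检出" + "和".join(frags) + "。"
-- ===== Notes on version B (the rewrite author's own statement) =====
-- stated objective: simpler
-- what changed: Two filter-comprehension passes plus a four-way literal-format branch are replaced by a single counting pass and assembly of description fragments joined with '和'.
import Mathlib
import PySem

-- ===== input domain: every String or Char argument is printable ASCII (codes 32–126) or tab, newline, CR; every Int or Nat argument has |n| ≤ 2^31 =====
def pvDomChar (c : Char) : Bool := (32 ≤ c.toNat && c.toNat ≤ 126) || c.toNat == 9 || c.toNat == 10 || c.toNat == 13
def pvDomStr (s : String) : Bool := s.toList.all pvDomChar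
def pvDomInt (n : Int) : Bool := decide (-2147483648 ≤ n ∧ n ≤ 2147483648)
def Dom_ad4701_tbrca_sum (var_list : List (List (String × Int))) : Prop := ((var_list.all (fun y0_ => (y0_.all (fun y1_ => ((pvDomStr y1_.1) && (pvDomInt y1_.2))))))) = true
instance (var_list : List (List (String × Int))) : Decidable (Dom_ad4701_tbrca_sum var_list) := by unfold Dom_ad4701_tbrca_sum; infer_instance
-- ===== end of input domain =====

-- B replaces A's two filter passes and four-way format branch by one counting pass and
-- fragment assembly joined with "和" (objective: simpler).

-- ===== PORT A =====
-- var["clinic_num_g"]: first match in the association list (raises KeyError when absent,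
-- excluded by Pre_; under Pre_ the comparison 'lookup == some k' is Python's 'var[...] == k').
def ad4701_tbrca_sum (var_list : List (List (String × Int))) : String :=
  let clinic_5_count := (var_list.filter (fun v => List.lookup "clinic_num_g" v == some 5)).length
  let clinic_4_count := (var_list.filter (fun v => List.lookup "clinic_num_g" v == some 4)).length
  if clinic_5_count ≠ 0 ∧ clinic_4_count ≠ 0 then
    "本次实验检出" ++ PySem.Int.toStr (Int.ofNat clinic_5_count) ++ "个致病性变异和" ++
      PySem.Int.toStr (Int.ofNat clinic_4_count) ++ "个疑似致病性变异。"
  else if clinic_5_count ≠ 0 ∧ clinic_4_count = 0 then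
    "本次实验检出" ++ PySem.Int.toStr (Int.ofNat clinic_5_count) ++ "个致病性变异。"
  else if clinic_5_count = 0 ∧ clinic_4_count ≠ 0 then
    "本次实验检出" ++ PySem.Int.toStr (Int.ofNat clinic_4_count) ++ "个疑似致病性变异。"
  else
    "本次实验未检出致病性或疑似致病性变异。"

-- ===== PORT B =====
-- loop body of B's counting pass (named helper for the fold)
def pvCountStep (p : Nat × Nat) (var : List (String × Int)) : Nat × Nat :=
  let v := List.lookup "clinic_num_g" var
  if v == some 5 then (p.1 + 1, p.2)
  else if v == some 4 then (p.1, p.2 + 1)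
  else p

def ad4701_tbrca_sum_alt (var_list : List (List (String × Int))) : String :=
  let cs := var_list.foldl pvCountStep (0, 0)
  let frags :=
    (if cs.1 ≠ 0 then [PySem.Int.toStr (Int.ofNat cs.1) ++ "个致病性变异"] else []) ++
    (if cs.2 ≠ 0 then [PySem.Int.toStr (Int.ofNat cs.2) ++ "个疑似致病性变异"] else [])
  if frags = [] then "本次实验未检出致病性或疑似致病性变异。"
  else "本次实验检出" ++ PySem.Str.join "和" frags ++ "。"

-- ===== PRECONDITION & SPEC =====
-- Pre_ excludes exactly the inputs where A (and B) raise KeyError: a dict missing "clinic_num_g".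
def Pre_ad4701_tbrca_sum (var_list : List (List (String × Int))) : Prop :=
  ∀ v ∈ var_list, (List.lookup "clinic_num_g" v).isSome
instance (var_list : List (List (String × Int))) : Decidable (Pre_ad4701_tbrca_sum var_list) := by
  unfold Pre_ad4701_tbrca_sum; infer_instance
def pvWitness_ad4701_tbrca_sum : (List (List (String × Int))) := [[("clinic_num_g", 5)], [("clinic_num_g", 3)]]
def Spec_ad4701_tbrca_sum (var_list : List (List (String × Int))) (out : String) : Prop := out = ad4701_tbrca_sum_alt var_list
instance (var_list : List (List (String × Int))) (out : String) : Decidable (Spec_ad4701_tbrca_sum var_list out) := by unfold Spec_ad4701_tbrca_sum; infer_instance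

-- ===== CLAIM (what is proved, stated in full; the proofs are below) =====
def Claim_equal_ad4701_tbrca_sum : Prop := ∀ (var_list : List (List (String × Int))), Dom_ad4701_tbrca_sum var_list → Pre_ad4701_tbrca_sum var_list → Spec_ad4701_tbrca_sum var_list (ad4701_tbrca_sum var_list)

-- ===== LEMMAS AND PROOFS =====

-- B's single fold computes A's two filter counts.
theorem pv_fold_counts (var_list : List (List (String × Int))) (a b : Nat) :
    var_list.foldl pvCountStep (a, b) =
    (a + (var_list.filter (fun v => List.lookup "clinic_num_g" v == some 5)).length,
     b + (var_list.filter (fun v => List.lookup "clinic_num_g" v == some 4)).length) := by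
  induction var_list generalizing a b with
  | nil => simp
  | cons x xs ih =>
    rw [List.foldl_cons]
    by_cases h5 : List.lookup "clinic_num_g" x = some 5
    · rw [show pvCountStep (a, b) x = (a + 1, b) from by simp [pvCountStep, h5], ih]
      simp [h5, Prod.ext_iff]
      omega
    · by_cases h4 : List.lookup "clinic_num_g" x = some 4
      · rw [show pvCountStep (a, b) x = (a, b + 1) from by simp [pvCountStep, h4], ih]
        simp [h4, Prod.ext_iff]
        omega
      · rw [show pvCountStep (a, b) x = (a, b) from by simp [pvCountStep, h5, h4], ih]
        simp [h5, h4]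

theorem pv_join_two (s t : String) : PySem.Str.join "和" [s, t] = s ++ "和" ++ t := by
  rw [← String.toList_inj]
  simp [PySem.Str.join, PySem.Chars.join_cons_cons, PySem.Chars.join_singleton,
    String.toList_append, String.toList_ofList]

theorem pv_join_one (s : String) : PySem.Str.join "和" [s] = s := by
  rw [← String.toList_inj]
  simp [PySem.Str.join, PySem.Chars.join_singleton]

-- ===== VERDICT (by name: the statement is the Claim_ definition above) =====
theorem ad4701_tbrca_sum_spec : Claim_equal_ad4701_tbrca_sum := by
  intro var_list _ _
  unfold Spec_ad4701_tbrca_sum ad4701_tbrca_sum ad4701_tbrca_sum_alt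
  rw [pv_fold_counts]
  set c5 := (var_list.filter (fun v => List.lookup "clinic_num_g" v == some 5)).length with hc5
  set c4 := (var_list.filter (fun v => List.lookup "clinic_num_g" v == some 4)).length with hc4
  by_cases h5 : c5 = 0 <;> by_cases h4 : c4 = 0 <;>
    simp [h5, h4, pv_join_one, pv_join_two, String.append_assoc]
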